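-- pv_equiv track=rewrite | github.com/wjs2063/BaekJoon | 백준/Gold/13422. 도둑/도둑.py | solve
-- ===== SOURCE A (Python) =====
-- def solve(bank,m,k):
--     n = len(bank)
--     answer = 0
--     pf_sum = [0] + bank + bank
--     if n == m and sum(bank) < k:
--         return 1
--     for i in range(1,len(pf_sum)):
--         pf_sum[i] += pf_sum[i - 1]
--     for i in range(1,n + 1):
--         sn,en = i , i + m - 1
--         if pf_sum[en] - pf_sum[sn - 1] < k :
--             answer += 1
--     return answer
-- ===== SOURCE B (Python) =====
-- def solve(bank, m, k):
--     n = len(bank)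
--     total = sum(bank)
--     if n == m:
--         return 1 if total < k else 0
--     w = sum(bank[:m])
--     answer = 1 if w < k else 0
--     for i in range(n - 1):
--         w += bank[(i + m) % n] - bank[i]
--         if w < k:
--             answer += 1
--     return answer
-- ===== Notes on version B (the rewrite author's own statement) =====
-- stated objective: simpler
-- what changed: Replaces the prefix-sum array over a doubled copy of the list with a single running window sum updated by subtract-leaving/add-entering with modulo indexing, and makes the n==m case a plain total<k test.
-- outside the precondition, e.g. on solve([1, 2], 3, 4): A returns 0, B returns 1; on solve([1, 2], -1, 0): A returns 1, B returns 0
import Mathlib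
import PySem

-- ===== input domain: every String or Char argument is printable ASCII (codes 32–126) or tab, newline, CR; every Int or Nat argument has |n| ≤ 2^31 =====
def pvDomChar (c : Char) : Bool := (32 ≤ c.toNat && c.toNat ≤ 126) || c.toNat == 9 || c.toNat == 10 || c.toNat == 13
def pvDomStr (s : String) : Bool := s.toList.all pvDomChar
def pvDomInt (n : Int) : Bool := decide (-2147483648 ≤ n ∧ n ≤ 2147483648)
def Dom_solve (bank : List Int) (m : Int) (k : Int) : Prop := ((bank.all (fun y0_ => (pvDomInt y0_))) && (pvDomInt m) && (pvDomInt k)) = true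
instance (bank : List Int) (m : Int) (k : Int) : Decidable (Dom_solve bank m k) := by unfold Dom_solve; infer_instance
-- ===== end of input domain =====

-- B replaces A's prefix-sum array over a doubled copy of the list with a single
-- running circular window sum (subtract leaving, add entering, modulo indexing):
-- O(1) extra space instead of O(n) and a plainer single pass (objective: simpler).

-- ===== PORT A =====
-- Python's in-place loop `for i in range(1,len(pf_sum)): pf_sum[i] += pf_sum[i-1]`
-- rendered as the obvious structural recursion carrying the previous cell's value.
def prefAcc : Int → List Int → List Int
  | _, [] => []
  | prev, x :: xs => (prev + x) :: prefAcc (prev + x) xs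

def solve (bank : List Int) (m : Int) (k : Int) : Int :=
  let n : Int := bank.length
  let pf0 : List Int := 0 :: (bank ++ bank)           -- [0] + bank + bank
  if n = m ∧ bank.sum < k then 1
  else
    let pf := prefAcc 0 pf0
    (PySem.List.pyRange 1 (n + 1) 1).foldl (fun answer i =>
      let sn := i
      let en := i + m - 1
      if PySem.List.pyGetD pf en 0 - PySem.List.pyGetD pf (sn - 1) 0 < k then answer + 1
      else answer) 0

-- ===== PORT B =====
def solve_alt (bank : List Int) (m : Int) (k : Int) : Int :=
  let n : Int := bank.length
  let total := bank.sum
  if n = m then (if total < k then 1 else 0)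
  else
    let w0 := (PySem.List.slice bank none (some m)).sum      -- sum(bank[:m])
    let a0 : Int := if w0 < k then 1 else 0
    let r := (PySem.List.pyRange 0 (n - 1) 1).foldl
      (fun (st : Int × Int) i =>
        let w := st.1 + PySem.List.pyGetD bank (PySem.Int.mod (i + m) n) 0
                      - PySem.List.pyGetD bank i 0
        (w, if w < k then st.2 + 1 else st.2)) (w0, a0)
    r.2

-- ===== PRECONDITION & SPEC =====
-- Pre_ restricts to the natural domain 0 ≤ m ≤ len(bank): for m < 0 A's prefix
-- differences read the array through Python's negative-index wraparound, and for
-- m > len(bank) A either raises IndexError or sums a window wrapping more than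
-- once around the bank — accidental values of the doubled-array representation.
def Pre_solve (bank : List Int) (m : Int) (k : Int) : Prop :=
  0 ≤ m ∧ m ≤ bank.length
instance (bank : List Int) (m : Int) (k : Int) : Decidable (Pre_solve bank m k) := by
  unfold Pre_solve; infer_instance

def pvWitness_solve : List Int × Int × Int := ([1, 2, 3], 2, 4)

def Spec_solve (bank : List Int) (m : Int) (k : Int) (out : Int) : Prop := out = solve_alt bank m k
instance (bank : List Int) (m : Int) (k : Int) (out : Int) : Decidable (Spec_solve bank m k out) := by unfold Spec_solve; infer_instance

-- ===== CLAIM (what is proved, stated in full; the proofs are below) =====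
def Claim_equal_solve : Prop := ∀ (bank : List Int) (m : Int) (k : Int), Dom_solve bank m k → Pre_solve bank m k → Spec_solve bank m k (solve bank m k)


-- ===== LEMMAS AND PROOFS =====

theorem prefAcc_getD (xs : List Int) : ∀ (c : Int) (j : Nat), j < xs.length →
    (prefAcc c xs).getD j 0 = c + (xs.take (j+1)).sum := by
  induction xs with
  | nil => intro c j h; simp at h
  | cons x xs ih =>
    intro c j h
    cases j with
    | zero => simp [prefAcc]
    | succ j =>
      simp only [prefAcc, List.getD_cons_succ, List.take_succ_cons, List.sum_cons]
      rw [ih (c + x) j (by simpa using h)]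
      ring

def pvW (bank : List Int) (mN s : Nat) : Int := (((bank ++ bank).drop s).take mN).sum

theorem circ_getD (bank : List Int) (j : Nat) (hn : 1 ≤ bank.length)
    (hj : j < 2 * bank.length) :
    (bank ++ bank).getD j 0 = bank.getD (j % bank.length) 0 := by
  by_cases h : j < bank.length
  · rw [Nat.mod_eq_of_lt h, List.getD_append _ _ _ _ h]
  · have h1 : j - bank.length < bank.length := by omega
    have h2 : j % bank.length = j - bank.length := by
      rw [Nat.mod_eq_sub_mod (by omega), Nat.mod_eq_of_lt h1]
    rw [h2]
    have : j = bank.length + (j - bank.length) := by omega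
    rw [this, List.getD_append_right _ _ _ _ (by omega)]

theorem pvW_step (bank : List Int) (mN t : Nat) (hm : mN ≤ bank.length)
    (ht : t + 1 < bank.length) :
    pvW bank mN (t+1) = pvW bank mN t + (bank ++ bank).getD (t + mN) 0 - (bank ++ bank).getD t 0 := by
  set D := bank ++ bank with hD
  have hlen : D.length = 2 * bank.length := by simp [hD]; omega
  have htD : t < D.length := by omega
  have htm : t + mN < D.length := by omega
  have e1 : (D.drop t).take (mN + 1) = D[t] :: (D.drop (t+1)).take mN := by
    rw [List.drop_eq_getElem_cons htD, List.take_succ_cons]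
  have e2 : (D.drop t).take (mN + 1) = (D.drop t).take mN ++ [(D.drop t)[mN]'(by simp; omega)] := by
    rw [List.take_succ, List.getElem?_eq_getElem (by simp; omega)]
    simp
  have e3 : (D.drop t)[mN]'(by simp; omega) = D[t + mN]'htm := by
    simp [List.getElem_drop]
  have h1 : D[t] + pvW bank mN (t+1) = pvW bank mN t + D[t + mN]'htm := by
    have h4 := congrArg List.sum e1
    rw [e2] at h4
    simp only [List.sum_append, List.sum_cons, List.sum_nil, e3] at h4
    simp only [pvW, ← hD]
    omega
  have g1 : D.getD t 0 = D[t]'htD := List.getD_eq_getElem D 0 htD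
  have g2 : D.getD (t + mN) 0 = D[t + mN]'htm := List.getD_eq_getElem D 0 htm
  omega

theorem pvW_rot (bank : List Int) (s : Nat) (hs : s ≤ bank.length) :
    pvW bank bank.length s = bank.sum := by
  unfold pvW
  rw [List.drop_append]
  have h1 : s - bank.length = 0 := by omega
  rw [h1, List.drop_zero, List.take_append]
  have h2 : (bank.drop s).length = bank.length - s := by simp
  rw [List.take_of_length_le (by omega), h2]
  have h3 : bank.length - (bank.length - s) = s := by omega
  rw [h3, List.sum_append]
  have h4 := congrArg List.sum (List.take_append_drop s bank)
  rw [List.sum_append] at h4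
  omega

theorem foldl_pyRange_count (P : Int → Prop) [DecidablePred P] :
    ∀ (N : Nat) (a : Int), (PySem.List.pyRange 1 ((N:Int)+1) 1).foldl
        (fun ans i => if P i then ans+1 else ans) a
      = a + ((List.range N).map (fun (s : Nat) => if P ((s:Int)+1) then (1:Int) else 0)).sum := by
  intro N
  induction N with
  | zero => intro a; rw [PySem.List.pyRange_one_eq_nil (by norm_num)]; simp
  | succ N ih =>
    intro a
    have hc : (((N+1:Nat)):Int)+1 = ((N:Int)+1)+1 := by push_cast; ring
    rw [hc, PySem.List.pyRange_one_succ_right (by omega), List.foldl_append, ih,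
        List.range_succ, List.map_append, List.sum_append]
    simp only [List.foldl_cons, List.foldl_nil, List.map_cons, List.map_nil, List.sum_cons,
      List.sum_nil]
    split_ifs <;> ring

theorem foldl_run (f g : Int → Int) (k : Int) (wf : Nat → Int) (a0 : Int) :
    ∀ (T : Nat), (∀ t, t < T → wf (t+1) = wf t + f (t:Int) - g (t:Int)) →
    (PySem.List.pyRange 0 (T:Int) 1).foldl
      (fun (st : Int × Int) i => (st.1 + f i - g i,
        if st.1 + f i - g i < k then st.2 + 1 else st.2)) (wf 0, a0)
    = (wf T, a0 + ((List.range T).map (fun (s : Nat) => if wf (s+1) < k then (1:Int) else 0)).sum) := by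
  intro T
  induction T with
  | zero => intro _; rw [PySem.List.pyRange_one_eq_nil (by norm_num)]; simp
  | succ T ih =>
    intro hstep
    have hc : ((T+1:Nat):Int) = (T:Int)+1 := by push_cast; ring
    rw [hc, PySem.List.pyRange_one_succ_right (by omega), List.foldl_append,
        ih (fun t ht => hstep t (by omega)),
        List.range_succ, List.map_append, List.sum_append]
    have hw : wf T + f (T:Int) - g (T:Int) = wf (T+1) := (hstep T (by omega)).symm
    simp only [List.foldl_cons, List.foldl_nil, hw, List.map_cons, List.map_nil, List.sum_cons,
      List.sum_nil]
    split_ifs <;> simp <;> ring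

theorem prefix_diff (bank : List Int) (mN s : Nat) :
    ((bank ++ bank).take (s + mN)).sum - ((bank ++ bank).take s).sum = pvW bank mN s := by
  rw [List.take_add, List.sum_append, pvW]
  ring

theorem A_loop_eq (bank : List Int) (mN : Nat) (k : Int) (hmn : mN ≤ bank.length) :
    (PySem.List.pyRange 1 ((bank.length:Int) + 1) 1).foldl
      (fun answer i => if PySem.List.pyGetD (prefAcc 0 (0 :: (bank ++ bank))) (i + (mN:Int) - 1) 0
          - PySem.List.pyGetD (prefAcc 0 (0 :: (bank ++ bank))) (i - 1) 0 < k then answer + 1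
        else answer) 0
    = ((List.range bank.length).map (fun (s : Nat) => if pvW bank mN s < k then (1:Int) else 0)).sum := by
  rw [show ((bank.length:Int) + 1) = (((bank.length : Nat)):Int) + 1 from rfl,
      foldl_pyRange_count (fun i => PySem.List.pyGetD (prefAcc 0 (0 :: (bank ++ bank))) (i + (mN:Int) - 1) 0
          - PySem.List.pyGetD (prefAcc 0 (0 :: (bank ++ bank))) (i - 1) 0 < k) bank.length 0,
      zero_add]
  apply congrArg
  apply List.map_congr_left
  intro s hs
  rw [List.mem_range] at hs
  have e1 : ((s:Int) + 1 + (mN:Int) - 1) = ((s + mN : Nat) : Int) := by push_cast; ring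
  have e2 : ((s:Int) + 1 - 1) = ((s : Nat) : Int) := by ring
  rw [e1, e2, PySem.List.pyGetD_natCast, PySem.List.pyGetD_natCast,
      prefAcc_getD _ _ _ (by simp; omega), prefAcc_getD _ _ _ (by simp; omega)]
  simp only [List.take_succ_cons, List.sum_cons, zero_add]
  rw [prefix_diff]

theorem w0_eq (bank : List Int) (mN : Nat) (hmn : mN ≤ bank.length) :
    (bank.take mN).sum = pvW bank mN 0 := by
  unfold pvW
  rw [List.drop_zero, List.take_append]
  have : mN - bank.length = 0 := by omega
  simp [this]

theorem B_step (bank : List Int) (mN : Nat) (k : Int) (hmn : mN ≤ bank.length)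
    (t : Nat) (ht : t < bank.length - 1) :
    pvW bank mN (t+1) = pvW bank mN t
      + PySem.List.pyGetD bank (PySem.Int.mod ((t:Int) + (mN:Int)) (bank.length:Int)) 0
      - PySem.List.pyGetD bank (t:Int) 0 := by
  have hn : 1 ≤ bank.length := by omega
  have e1 : ((t:Int) + (mN:Int)) = ((t + mN : Nat) : Int) := by push_cast; ring
  rw [e1, show ((bank.length:Int)) = (((bank.length : Nat)):Int) from rfl,
      PySem.Int.mod_natCast, PySem.List.pyGetD_natCast, PySem.List.pyGetD_natCast]
  rw [show bank.getD ((t + mN) % bank.length) 0 = (bank ++ bank).getD (t + mN) 0 from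
        (circ_getD bank (t + mN) hn (by omega)).symm,
      show bank.getD t 0 = (bank ++ bank).getD t 0 from
        (List.getD_append _ _ _ _ (by omega)).symm]
  exact pvW_step bank mN t hmn (by omega)

theorem main_eq (bank : List Int) (mN : Nat) (k : Int) (hmn : mN ≤ bank.length) :
    solve bank (mN:Int) k = solve_alt bank (mN:Int) k := by
  by_cases hnm : (bank.length:Int) = (mN:Int)
  · have hnmN : bank.length = mN := by exact_mod_cast hnm
    by_cases hk : bank.sum < k
    · simp [solve, solve_alt, hnm, hk]
    · simp only [solve, solve_alt]
      rw [if_neg (by tauto), if_pos hnm, if_neg hk, A_loop_eq bank mN k hmn]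
      apply List.sum_eq_zero
      intro x hx
      rw [List.mem_map] at hx
      obtain ⟨s, hs, rfl⟩ := hx
      rw [List.mem_range] at hs
      rw [← hnmN, pvW_rot bank s (by omega)]
      simp [hk]
  · have hne : bank.length ≠ mN := fun h => hnm (by exact_mod_cast h)
    have hn : 1 ≤ bank.length := by omega
    simp only [solve, solve_alt]
    rw [if_neg (by tauto), if_neg hnm, A_loop_eq bank mN k hmn]
    rw [PySem.List.slice_to_natCast, w0_eq bank mN hmn]
    have hT : ((bank.length:Int) - 1) = ((bank.length - 1 : Nat) : Int) := by
      push_cast [hn]; omega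
    rw [hT]
    have hrun := foldl_run
      (fun i => PySem.List.pyGetD bank (PySem.Int.mod (i + (mN:Int)) (bank.length:Int)) 0)
      (fun i => PySem.List.pyGetD bank i 0) k (pvW bank mN)
      (if pvW bank mN 0 < k then 1 else 0) (bank.length - 1)
      (fun t ht => B_step bank mN k hmn t (by omega))
    simp only at hrun
    rw [hrun]
    have hsplit : bank.length = (bank.length - 1) + 1 := by omega
    rw [hsplit, List.range_succ_eq_map, List.map_cons, List.sum_cons, List.map_map]
    congr 1

-- ===== VERDICT (by name: the statement is the Claim_ definition above) =====
theorem solve_spec : Claim_equal_solve := by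
  intro bank m k _ hpre
  unfold Spec_solve
  obtain ⟨h0, h1⟩ := hpre
  obtain ⟨mN, rfl⟩ : ∃ mN : Nat, m = (mN : Int) := ⟨m.toNat, (Int.toNat_of_nonneg h0).symm⟩
  exact main_eq bank mN k (by exact_mod_cast h1)
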